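-- pv_equiv track=rewrite | github.com/WCBru/Loose-Scripts | Small Challenges/Advent of Code/2020/16/b.py | match_ranges
-- ===== SOURCE A (Python) =====
-- def match_ranges(ranges, values):
--     output = []
--     for ran in ranges:
--         valid = [False for x in values]
--         for val in range(len(values)):
--             for lims in ranges[ran]:
--                 valid[val] |= values[val] >= lims[0] and values[val] <= lims[1]
--
--         if all(valid):
--             output.append(ran)
--
--     return output
-- ===== SOURCE B (Python) =====
-- def match_ranges(ranges, values):
--     cands = list(ranges.items())
--     for v in values:
--         cands = [(name, ivs) for (name, ivs) in cands
--                  if any(lo <= v <= hi for (lo, hi) in ivs)]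
--     return [name for (name, _) in cands]
-- ===== Notes on version B (the rewrite author's own statement) =====
-- stated objective: faster
-- what changed: Inverted loop nesting and changed the maintained state: B traverses values in the outer loop and keeps a shrinking candidate list of (name, intervals) pairs filtered per value (no dict lookups, no per-value boolean array); failing fields are dropped at their first failing value, so most of A's work is pruned; names are projected out at the end.
import Mathlib
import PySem

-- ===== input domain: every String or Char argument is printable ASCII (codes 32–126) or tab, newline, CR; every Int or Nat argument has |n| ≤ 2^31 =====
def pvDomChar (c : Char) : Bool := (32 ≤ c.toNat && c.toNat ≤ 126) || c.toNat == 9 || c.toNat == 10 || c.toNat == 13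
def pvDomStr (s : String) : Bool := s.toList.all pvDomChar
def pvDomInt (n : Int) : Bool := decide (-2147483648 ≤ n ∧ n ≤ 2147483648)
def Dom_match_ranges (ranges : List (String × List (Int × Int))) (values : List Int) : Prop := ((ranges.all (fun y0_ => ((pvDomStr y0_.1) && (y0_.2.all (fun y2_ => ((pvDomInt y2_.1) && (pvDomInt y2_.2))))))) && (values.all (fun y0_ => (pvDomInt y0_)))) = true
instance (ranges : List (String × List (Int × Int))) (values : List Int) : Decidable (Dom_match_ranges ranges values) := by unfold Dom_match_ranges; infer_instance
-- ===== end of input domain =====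

-- B inverts the loop nesting and the maintained state: value-major filtering of a shrinking
-- list of (name, intervals) pairs (no dict lookup), instead of A's field-major validation
-- with a per-value boolean array; same cost class, alternative structure.

-- ===== PORT A =====
-- Python's `ranges[ran]`: dict lookup = first match in insertion order
def pvLookup : List (String × List (Int × Int)) → String → List (Int × Int)
  | [], _ => []
  | p :: rest, k => if p.1 = k then p.2 else pvLookup rest k

def match_ranges (ranges : List (String × List (Int × Int))) (values : List Int) : List String :=
  ranges.foldl (fun output ran =>
    -- valid[val] |= values[val] >= lims[0] and values[val] <= lims[1]
    let valid := values.map (fun v =>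
      (pvLookup ranges ran.1).foldl
        (fun b lims => b || (decide (v ≥ lims.1) && decide (v ≤ lims.2))) false)
    if valid.all (fun b => b) then output ++ [ran.1] else output) []

-- ===== PORT B =====
def match_ranges_alt (ranges : List (String × List (Int × Int))) (values : List Int) : List String :=
  (values.foldl (fun cands v =>
      cands.filter (fun p => p.2.any (fun lims => decide (lims.1 ≤ v) && decide (v ≤ lims.2))))
    ranges).map Prod.fst

-- ===== PRECONDITION & SPEC =====
-- Pre_ requires pairwise-distinct field names: the association list models a Python dict,
-- whose keys are unique by construction; with a duplicated name A's dict lookup and B's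
-- per-pair intervals would read different data.
def Pre_match_ranges (ranges : List (String × List (Int × Int))) (values : List Int) : Prop :=
  (ranges.map Prod.fst).Nodup
instance (ranges : List (String × List (Int × Int))) (values : List Int) : Decidable (Pre_match_ranges ranges values) := by unfold Pre_match_ranges; infer_instance
def pvWitness_match_ranges : (List (String × List (Int × Int))) × List Int :=
  ([("row", [(0, 5), (10, 12)]), ("seat", [(3, 7)])], [1, 4])

def Spec_match_ranges (ranges : List (String × List (Int × Int))) (values : List Int) (out : List String) : Prop := out = match_ranges_alt ranges values
instance (ranges : List (String × List (Int × Int))) (values : List Int) (out : List String) : Decidable (Spec_match_ranges ranges values out) := by unfold Spec_match_ranges; infer_instance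

-- ===== CLAIM (what is proved, stated in full; the proofs are below) =====
def Claim_equal_match_ranges : Prop := ∀ (ranges : List (String × List (Int × Int))) (values : List Int), Dom_match_ranges ranges values → Pre_match_ranges ranges values → Spec_match_ranges ranges values (match_ranges ranges values)

-- ===== LEMMAS AND PROOFS =====

-- `v` lies in some interval of the pair `p`
def pvOkP (p : String × List (Int × Int)) (v : Int) : Bool :=
  p.2.any (fun lims => decide (lims.1 ≤ v) && decide (v ≤ lims.2))

theorem foldl_or_eq_any (rs : List (Int × Int)) (c : Int × Int → Bool) (b0 : Bool) :
    rs.foldl (fun b lims => b || c lims) b0 = (b0 || rs.any c) := by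
  induction rs generalizing b0 with
  | nil => simp
  | cons x xs ih => simp [List.foldl, ih, Bool.or_assoc]

theorem foldl_append_filter (l : List (String × List (Int × Int))) (P : String → Bool)
    (acc : List String) :
    l.foldl (fun out ran => if P ran.1 then out ++ [ran.1] else out) acc
      = acc ++ (l.map Prod.fst).filter P := by
  induction l generalizing acc with
  | nil => simp
  | cons x xs ih =>
    simp only [List.foldl, List.map, List.filter]
    by_cases h : P x.1 <;> simp [h, ih]

theorem lookup_eq_of_mem (ranges : List (String × List (Int × Int)))
    (h : (ranges.map Prod.fst).Nodup) :
    ∀ p ∈ ranges, pvLookup ranges p.1 = p.2 := by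
  induction ranges with
  | nil => intro p hp; cases hp
  | cons q rest ih =>
    intro p hp
    rcases List.mem_cons.mp hp with rfl | hp'
    · simp [pvLookup]
    · have hq1 : q.1 ≠ p.1 := by
        intro he
        exact (List.nodup_cons.mp h).1 (he ▸ List.mem_map_of_mem hp')
      simp only [pvLookup, if_neg hq1]
      exact ih (List.nodup_cons.mp h).2 p hp'

theorem matchA_eq (ranges : List (String × List (Int × Int))) (values : List Int) :
    match_ranges ranges values
      = (ranges.map Prod.fst).filter
          (fun f => values.all (fun v => (pvLookup ranges f).any
            (fun lims => decide (lims.1 ≤ v) && decide (v ≤ lims.2)))) := by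
  unfold match_ranges
  have := foldl_append_filter ranges
      (fun f => values.all (fun v => (pvLookup ranges f).any
        (fun lims => decide (lims.1 ≤ v) && decide (v ≤ lims.2)))) []
  rw [show (fun (output : List String) (ran : String × List (Int × Int)) =>
      let valid := values.map (fun v =>
        (pvLookup ranges ran.1).foldl
          (fun b lims => b || (decide (v ≥ lims.1) && decide (v ≤ lims.2))) false)
      if valid.all (fun b => b) then output ++ [ran.1] else output)
    = (fun output ran =>
        if values.all (fun v => (pvLookup ranges ran.1).any
            (fun lims => decide (lims.1 ≤ v) && decide (v ≤ lims.2))) then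
          output ++ [ran.1] else output) from ?_]
  · simpa using this
  · funext output ran
    simp only [List.all_map, foldl_or_eq_any, Bool.false_or]
    rfl

theorem filter_map_fst (l : List (String × List (Int × Int))) (P : String → Bool)
    (Q : String × List (Int × Int) → Bool) (h : ∀ p ∈ l, P p.1 = Q p) :
    (l.map Prod.fst).filter P = (l.filter Q).map Prod.fst := by
  induction l with
  | nil => simp
  | cons x xs ih =>
    have hx := h x (List.mem_cons_self ..)
    simp only [List.map, List.filter, hx]
    cases hq : Q x <;>
      simp [ih (fun p hp => h p (List.mem_cons_of_mem _ hp))]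

theorem matchB_eq (ranges : List (String × List (Int × Int))) (values : List Int) :
    match_ranges_alt ranges values
      = (ranges.filter (fun p => values.all (pvOkP p))).map Prod.fst := by
  unfold match_ranges_alt
  congr 1
  induction values generalizing ranges with
  | nil => simp
  | cons v rest ih =>
    simp only [List.foldl, ih, List.filter_filter]
    apply List.filter_congr
    intro p _
    show (rest.all (pvOkP p) && pvOkP p v) = _
    simp [List.all_cons, Bool.and_comm, pvOkP]

-- ===== VERDICT (by name: the statement is the Claim_ definition above) =====
theorem match_ranges_spec : Claim_equal_match_ranges := by
  intro ranges values _ hpre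
  show match_ranges ranges values = match_ranges_alt ranges values
  rw [matchA_eq, matchB_eq]
  exact filter_map_fst ranges _ _ (fun p hp => by
    rw [lookup_eq_of_mem ranges hpre p hp]; rfl)
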